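-- pv_equiv track=rewrite | github.com/NewUU-CS111-Fall2023/week-2-assignment-datatypes-Itcoderbek | src/py/main.py | spawn_enemies
-- ===== SOURCE A (Python) =====
-- def spawn_enemies(coordinates):
--     enemy_spawned = False
--     for coord in coordinates:
--         if coord == "spawn":
--             enemy_spawned = True
--         elif coord == "character_died" and enemy_spawned:
--             return True
--         elif coord == "character_died" and not enemy_spawned:
--             return False
--     return False
-- ===== SOURCE B (Python) =====
-- def spawn_enemies(coordinates):
--     coords = list(coordinates)
--     try:
--         i = coords.index("character_died")
--     except ValueError:
--         return False
--     return "spawn" in coords[:i]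
-- ===== Notes on version B (the rewrite author's own statement) =====
-- stated objective: simpler
-- what changed: Replaces A's stateful early-exit flag loop with a locate-then-check decomposition: find the first 'character_died' and test whether 'spawn' occurs in the prefix before it.
import Mathlib
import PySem

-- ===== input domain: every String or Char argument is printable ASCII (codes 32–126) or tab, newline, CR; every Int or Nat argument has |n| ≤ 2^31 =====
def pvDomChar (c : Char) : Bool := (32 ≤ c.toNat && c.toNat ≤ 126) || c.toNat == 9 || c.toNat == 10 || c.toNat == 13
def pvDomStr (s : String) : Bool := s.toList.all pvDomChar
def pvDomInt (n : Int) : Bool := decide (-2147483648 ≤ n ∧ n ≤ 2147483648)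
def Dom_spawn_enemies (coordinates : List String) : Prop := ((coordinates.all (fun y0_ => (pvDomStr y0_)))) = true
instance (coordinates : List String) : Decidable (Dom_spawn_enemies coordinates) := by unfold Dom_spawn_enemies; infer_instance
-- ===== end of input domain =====

-- B replaces A's stateful early-exit flag loop by locate-the-first-"character_died" then
-- check whether "spawn" occurs in the prefix before it (same cost, plainer decomposition).


-- ===== PORT A =====
-- A: stateful early-exit loop over the list with an enemy_spawned flag.
def spawn_enemies_loop (enemy_spawned : Bool) : List String → Bool
  | [] => false
  | coord :: rest =>
      if coord == "spawn" then spawn_enemies_loop true rest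
      else if coord == "character_died" && enemy_spawned then true
      else if coord == "character_died" && !enemy_spawned then false
      else spawn_enemies_loop enemy_spawned rest

def spawn_enemies (coordinates : List String) : Bool :=
  spawn_enemies_loop false coordinates

-- ===== PORT B =====
-- B: find the first "character_died"; if none return false, else test "spawn" in the prefix.
def spawn_enemies_alt (coordinates : List String) : Bool :=
  match PySem.List.index? coordinates "character_died" with
  | none => false
  | some i => (PySem.List.slice coordinates none (some (i : Int))).contains "spawn"

-- ===== PRECONDITION & SPEC =====
def Spec_spawn_enemies (coordinates : List String) (out : Bool) : Prop := out = spawn_enemies_alt coordinates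
instance (coordinates : List String) (out : Bool) : Decidable (Spec_spawn_enemies coordinates out) := by unfold Spec_spawn_enemies; infer_instance

-- ===== CLAIM (what is proved, stated in full; the proofs are below) =====
def Claim_equal_spawn_enemies : Prop := ∀ (coordinates : List String), Dom_spawn_enemies coordinates → Spec_spawn_enemies coordinates (spawn_enemies coordinates)

-- ===== LEMMAS AND PROOFS =====

theorem loop_eq (b : Bool) (l : List String) :
    spawn_enemies_loop b l =
      match PySem.List.index? l "character_died" with
      | none => false
      | some i => b || (l.take i).contains "spawn" := by
  induction l generalizing b with
  | nil => simp [spawn_enemies_loop, PySem.List.index?_eq_idxOf?, List.idxOf?]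
  | cons c rest ih =>
      by_cases hd : c = "character_died"
      · subst hd
        rw [PySem.List.index?_cons_self]
        simp only [spawn_enemies_loop]
        cases b <;> simp
      · have hne : (c == "character_died") = false := by simpa using hd
        simp only [PySem.List.index?_eq_idxOf?, List.idxOf?_cons, hne] at *
        by_cases hs : c = "spawn"
        · subst hs
          simp only [spawn_enemies_loop, beq_self_eq_true, if_true]
          rw [ih true]
          cases List.idxOf? "character_died" rest with
          | none => simp
          | some i => simp [List.take_succ_cons]
        · simp only [spawn_enemies_loop, beq_iff_eq, hs, if_false]
          rw [ih b]
          cases h : List.idxOf? "character_died" rest with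
          | none => simp [hd]
          | some i =>
              simp [List.take_succ_cons, hd, Ne.symm hs]

-- ===== VERDICT (by name: the statement is the Claim_ definition above) =====
theorem spawn_enemies_spec : Claim_equal_spawn_enemies := by
  intro l _
  unfold Spec_spawn_enemies spawn_enemies spawn_enemies_alt
  rw [loop_eq]
  cases h : PySem.List.index? l "character_died" with
  | none => rfl
  | some i => simp [PySem.List.slice_to_natCast]
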